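-- pv_equiv track=rewrite | github.com/Stephvideo/Competitive-Programming | .history/RedVsBlue_20220524153716.py | getRedConsec
-- ===== SOURCE A (Python) =====
-- def getRedConsec(s):
--     max = 0
--     current = 0
--     for char in s:
--         if char == 'R':
--             current += 1
--         else:
--             if current > max:
--                 max = current
--             current = 0
--
--     if current > max:
--         max = current
--     return max
-- ===== SOURCE B (Python) =====
-- def getRedConsec(s):
--     runs = ''.join(c if c == 'R' else ' ' for c in s).split()
--     return max(map(len, runs), default=0)
-- ===== Notes on version B (the rewrite author's own statement) =====
-- stated objective: idiomatic
-- what changed: Replaces the manual running-counter-with-flush loop by masking every non-'R' character to a space, splitting the masked string into the maximal 'R' runs, and taking the max of their lengths (default 0).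
import Mathlib
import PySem

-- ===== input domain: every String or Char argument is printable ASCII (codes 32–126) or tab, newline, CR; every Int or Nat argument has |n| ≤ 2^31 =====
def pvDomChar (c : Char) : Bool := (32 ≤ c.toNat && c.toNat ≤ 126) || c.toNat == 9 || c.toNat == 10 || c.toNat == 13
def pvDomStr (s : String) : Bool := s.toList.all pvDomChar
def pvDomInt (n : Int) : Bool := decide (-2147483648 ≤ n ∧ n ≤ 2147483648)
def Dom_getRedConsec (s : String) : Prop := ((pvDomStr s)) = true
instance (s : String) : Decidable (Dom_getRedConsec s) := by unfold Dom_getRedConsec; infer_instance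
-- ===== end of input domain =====

-- B replaces A's running-counter loop by "mask non-'R' to spaces, split into runs, max of run lengths" (idiomatic; same cost).

-- ===== PORT A =====
-- the loop body: if char == 'R': current += 1 else: flush current into max
def getRedConsecStep (st : Int × Int) (ch : Char) : Int × Int :=
  if ch = 'R' then (st.1, st.2 + 1)
  else (if st.2 > st.1 then st.2 else st.1, 0)

def getRedConsec (s : String) : Int :=
  let st := s.toList.foldl getRedConsecStep (0, 0)
  if st.2 > st.1 then st.2 else st.1

-- ===== PORT B =====
-- ''.join(c if c == 'R' else ' ' for c in s).split() ported at the List Char level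
-- (PySem.Str.split₀ is PySem.Chars.split₀ on .toList; the join of one-char strings is the map)
def getRedConsec_alt (s : String) : Int :=
  let runs := PySem.Chars.split₀ (s.toList.map (fun c => if c = 'R' then c else ' '))
  (runs.map (fun w => (w.length : Int))).foldl max 0

-- ===== PRECONDITION & SPEC =====
def Spec_getRedConsec (s : String) (out : Int) : Prop := out = getRedConsec_alt s
instance (s : String) (out : Int) : Decidable (Spec_getRedConsec s out) := by unfold Spec_getRedConsec; infer_instance

-- ===== CLAIM (what is proved, stated in full; the proofs are below) =====
def Claim_equal_getRedConsec : Prop := ∀ (s : String), Dom_getRedConsec s → Spec_getRedConsec s (getRedConsec s)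

-- ===== LEMMAS AND PROOFS =====

theorem go_acc (l cur : List Char) (acc : List (List Char)) :
    PySem.Chars.split₀.go l cur acc = acc.reverse ++ PySem.Chars.split₀.go l cur [] := by
  induction l generalizing cur acc with
  | nil => simp [PySem.Chars.split₀.go]; split_ifs <;> simp
  | cons c rest ih =>
    simp only [PySem.Chars.split₀.go]
    split_ifs with h1 h2
    · rw [ih [] acc]
    · rw [ih [] (cur.reverse :: acc), ih [] [cur.reverse]]; simp
    · exact ih (c :: cur) acc

theorem foldl_max_max (L : List Int) (a b : Int) :
    L.foldl max (max a b) = max a (L.foldl max b) := by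
  induction L generalizing b with
  | nil => rfl
  | cons x t ih => simp only [List.foldl_cons, max_assoc, ih]

theorem foldl_max_init_le (L : List Int) (a : Int) : a ≤ L.foldl max a := by
  induction L generalizing a with
  | nil => simp
  | cons x t ih => exact le_trans (le_max_left a x) (ih _)

-- invariant relating A's loop state (m, n) to B's split of the remaining masked chars,
-- with cur = the reversed current 'R'-run of length n
theorem main_inv (l : List Char) (m : Int) (n : Nat) (hm : 0 ≤ m) :
    (let st := l.foldl getRedConsecStep (m, (n : Int));
     if st.2 > st.1 then st.2 else st.1) =
    max m (((PySem.Chars.split₀.go (l.map (fun c => if c = 'R' then c else ' '))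
        (List.replicate n 'R') []).map (fun w => (w.length : Int))).foldl max 0) := by
  induction l generalizing m n with
  | nil =>
    simp only [List.foldl_nil, List.map_nil, PySem.Chars.split₀.go]
    cases n with
    | zero => simp; omega
    | succ k =>
      simp
      omega
  | cons c rest ih =>
    by_cases hc : c = 'R'
    · subst hc
      rw [List.foldl_cons, List.map_cons,
        show (if ('R':Char) = 'R' then 'R' else ' ') = 'R' from rfl,
        show getRedConsecStep (m, (n:Int)) 'R' = (m, (n:Int)+1) from by simp [getRedConsecStep],
        PySem.Chars.split₀.go,
        if_neg (show ¬(PySem.Chars.isspace 'R' = true) from by decide),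
        show ('R' :: List.replicate n 'R') = List.replicate (n+1) 'R' from
          List.replicate_succ.symm]
      have := ih m (n+1) hm
      push_cast at this ⊢
      exact this
    · simp only [List.foldl_cons, List.map_cons, getRedConsecStep, if_neg hc,
        PySem.Chars.split₀.go, (by decide : PySem.Chars.isspace ' ' = true), if_true]
      cases n with
      | zero =>
        simp only [List.replicate_zero, List.isEmpty_nil, if_true, Nat.cast_zero]
        have h0 : (if (0 : Int) > m then (0 : Int) else m) = m := by omega
        have := ih m 0 hm
        simp only [Nat.cast_zero, List.replicate_zero] at this
        rw [h0, this]
      | succ k =>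
        rw [if_neg (show ¬((List.replicate (k+1) 'R').isEmpty = true) by simp)]
        rw [go_acc _ [] [(List.replicate (k+1) 'R').reverse]]
        have hI := ih (if ((k+1 : Nat) : Int) > m then ((k+1 : Nat) : Int) else m) 0
          (by split_ifs <;> omega)
        simp only [Nat.cast_zero, List.replicate_zero] at hI
        rw [hI]
        simp only [List.reverse_cons, List.reverse_nil, List.nil_append, List.map_append,
          List.map_cons, List.map_nil, List.length_reverse, List.length_replicate,
          List.foldl_append, List.foldl_cons, List.foldl_nil]
        rw [max_comm (0:Int) ((k+1 : Nat) : Int), foldl_max_max]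
        have hmax : (if ((k+1 : Nat) : Int) > m then ((k+1 : Nat) : Int) else m)
            = max m ((k+1 : Nat) : Int) := by
          rcases le_or_gt ((k+1 : Nat) : Int) m with h | h
          · rw [if_neg (by omega), max_eq_left h]
          · rw [if_pos h, max_eq_right h.le]
        rw [hmax, max_assoc]

-- ===== VERDICT (by name: the statement is the Claim_ definition above) =====
theorem getRedConsec_spec : Claim_equal_getRedConsec := by
  intro s _
  show getRedConsec s = getRedConsec_alt s
  unfold getRedConsec getRedConsec_alt PySem.Chars.split₀
  have h := main_inv s.toList 0 0 le_rfl
  simp only [Nat.cast_zero, List.replicate_zero] at h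
  rw [h, max_eq_right (foldl_max_init_le _ 0)]
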